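-- pv_equiv track=rewrite | github.com/montana2ab/poker | src/holdem/abstraction/preflop_lossless.py | bucket_to_hand_type
-- ===== SOURCE A (Python) =====
-- from typing import List, Tuple
--
-- RANK_ORDER = ['A', 'K', 'Q', 'J', 'T', '9', '8', '7', '6', '5', '4', '3', '2']
--
-- def bucket_to_hand_type(bucket: int) -> Tuple[str, str, bool]:
--     """Convert bucket index back to hand type.
--
--     Args:
--         bucket: Bucket index from 0 to 168
--
--     Returns:
--         Tuple of (high_rank, low_rank, is_suited)
--     """
--     if bucket < 0 or bucket > 168:
--         raise ValueError(f"Bucket must be between 0 and 168, got {bucket}")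
--
--     # Pairs (0-12)
--     if bucket <= 12:
--         rank = RANK_ORDER[bucket]
--         return rank, rank, False
--
--     # Suited (13-90) - 78 combinations
--     if bucket <= 90:
--         suited_offset = bucket - 13
--         # Find row and column in upper triangle
--         row = 0
--         count = 0
--         while count + (12 - row) <= suited_offset:
--             count += (12 - row)
--             row += 1
--         col = row + 1 + (suited_offset - count)
--         return RANK_ORDER[row], RANK_ORDER[col], True
--
--     # Offsuit (91-168) - 78 combinations
--     offsuit_offset = bucket - 91
--     row = 0
--     count = 0
--     while count + (12 - row) <= offsuit_offset:
--         count += (12 - row)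
--         row += 1
--     col = row + 1 + (offsuit_offset - count)
--     return RANK_ORDER[row], RANK_ORDER[col], False
-- ===== SOURCE B (Python) =====
-- RANK_ORDER = ['A', 'K', 'Q', 'J', 'T', '9', '8', '7', '6', '5', '4', '3', '2']
--
-- def bucket_to_hand_type(bucket):
--     if bucket < 0 or bucket > 168:
--         raise ValueError(f"Bucket must be between 0 and 168, got {bucket}")
--     table = [(r, r, False) for r in RANK_ORDER]
--     table += [(RANK_ORDER[i], RANK_ORDER[j], True)
--               for i in range(13) for j in range(i + 1, 13)]
--     table += [(RANK_ORDER[i], RANK_ORDER[j], False)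
--               for i in range(13) for j in range(i + 1, 13)]
--     return table[bucket]
-- ===== Notes on version B (the rewrite author's own statement) =====
-- stated objective: simpler
-- what changed: B replaces A's inverse triangular-index while-loop decoding with a forward enumeration: it builds the full 169-entry table (pairs, suited upper-triangle, offsuit upper-triangle) in bucket order and simply indexes it.
import Mathlib
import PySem

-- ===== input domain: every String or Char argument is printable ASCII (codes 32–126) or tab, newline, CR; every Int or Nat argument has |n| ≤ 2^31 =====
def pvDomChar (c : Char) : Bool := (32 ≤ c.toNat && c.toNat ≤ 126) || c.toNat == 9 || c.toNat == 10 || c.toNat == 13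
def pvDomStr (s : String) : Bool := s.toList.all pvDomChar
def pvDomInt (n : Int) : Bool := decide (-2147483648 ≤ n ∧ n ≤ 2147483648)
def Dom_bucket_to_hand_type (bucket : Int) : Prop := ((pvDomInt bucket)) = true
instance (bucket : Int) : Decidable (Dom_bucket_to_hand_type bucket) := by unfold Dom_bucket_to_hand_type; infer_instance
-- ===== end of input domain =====

-- ===== PORT A =====
-- B builds the 169-entry table forward and indexes it, replacing A's inverse
-- triangular-index while-loop (objective: simpler). Pre_ excludes the inputs
-- outside 0..168 on which A raises ValueError.
def rankOrder : List String := ["A", "K", "Q", "J", "T", "9", "8", "7", "6", "5", "4", "3", "2"]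

-- the while loop 'while count + (12 - row) <= offset: count += 12 - row; row += 1',
-- transliterated with fuel 13 (the loop body runs at most 12 times since offset ≤ 77)
def pvFindRow (offset : Int) : Nat → Int → Int → Int × Int
  | 0, row, count => (row, count)
  | f + 1, row, count =>
      if count + (12 - row) ≤ offset then pvFindRow offset f (row + 1) (count + (12 - row))
      else (row, count)

def bucket_to_hand_type (bucket : Int) : String × String × Bool :=
  if bucket ≤ 12 then
    let rank := (PySem.List.pyGet? rankOrder bucket).getD ""
    (rank, rank, false)
  else if bucket ≤ 90 then
    let suitedOffset := bucket - 13
    let rc := pvFindRow suitedOffset 13 0 0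
    let col := rc.1 + 1 + (suitedOffset - rc.2)
    ((PySem.List.pyGet? rankOrder rc.1).getD "", (PySem.List.pyGet? rankOrder col).getD "", true)
  else
    let offsuitOffset := bucket - 91
    let rc := pvFindRow offsuitOffset 13 0 0
    let col := rc.1 + 1 + (offsuitOffset - rc.2)
    ((PySem.List.pyGet? rankOrder rc.1).getD "", (PySem.List.pyGet? rankOrder col).getD "", false)

-- ===== PORT B =====
def pvRank (i : Int) : String := (PySem.List.pyGet? rankOrder i).getD ""

def pvTable : List (String × String × Bool) :=
  rankOrder.map (fun r => (r, r, false))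
    ++ (PySem.List.pyRange 0 13 1).flatMap
        (fun i => (PySem.List.pyRange (i + 1) 13 1).map (fun j => (pvRank i, pvRank j, true)))
    ++ (PySem.List.pyRange 0 13 1).flatMap
        (fun i => (PySem.List.pyRange (i + 1) 13 1).map (fun j => (pvRank i, pvRank j, false)))

def bucket_to_hand_type_alt (bucket : Int) : String × String × Bool :=
  (PySem.List.pyGet? pvTable bucket).getD ("", "", false)

-- ===== PRECONDITION & SPEC =====
-- Pre_ excludes exactly the buckets outside 0..168, where A raises ValueError
def Pre_bucket_to_hand_type (bucket : Int) : Prop := 0 ≤ bucket ∧ bucket ≤ 168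
instance (bucket : Int) : Decidable (Pre_bucket_to_hand_type bucket) := by unfold Pre_bucket_to_hand_type; infer_instance

def pvWitness_bucket_to_hand_type : Int := 42

def Spec_bucket_to_hand_type (bucket : Int) (out : String × String × Bool) : Prop := out = bucket_to_hand_type_alt bucket
instance (bucket : Int) (out : String × String × Bool) : Decidable (Spec_bucket_to_hand_type bucket out) := by unfold Spec_bucket_to_hand_type; infer_instance

-- ===== CLAIM (what is proved, stated in full; the proofs are below) =====
def Claim_equal_bucket_to_hand_type : Prop := ∀ (bucket : Int), Dom_bucket_to_hand_type bucket → Pre_bucket_to_hand_type bucket → Spec_bucket_to_hand_type bucket (bucket_to_hand_type bucket)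

-- ===== LEMMAS AND PROOFS =====
set_option maxHeartbeats 4000000 in
set_option maxRecDepth 4096 in
theorem pv_agree_nat : ∀ n : Nat, n < 169 → bucket_to_hand_type (n : Int) = bucket_to_hand_type_alt (n : Int) := by decide

-- ===== VERDICT (by name: the statement is the Claim_ definition above) =====
set_option maxRecDepth 4096 in
theorem bucket_to_hand_type_spec : Claim_equal_bucket_to_hand_type := by
  intro bucket _ hpre
  unfold Spec_bucket_to_hand_type
  obtain ⟨h0, h1⟩ := hpre
  have hb : bucket = ((bucket.toNat : Nat) : Int) := by omega
  rw [hb]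
  exact (pv_agree_nat bucket.toNat (by omega))
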